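-- pv_equiv track=rewrite | github.com/radesh20/Filli-1 | persistence.py | get_customer_action_history
-- ===== SOURCE A (Python) =====
-- def get_customer_action_history(action_log, customer_name):
--     """Count emails and calls for a customer from the action log."""
--     emails = 0
--     calls = 0
--     for a in action_log:
--         if a.get("customer", "").lower() == customer_name.lower():
--             if a.get("type") == "email":
--                 emails += 1
--             elif a.get("type") == "call":
--                 calls += 1
--     return emails, calls
-- ===== SOURCE B (Python) =====
-- def get_customer_action_history(action_log, customer_name):
--     """Count emails and calls for a customer from the action log."""
--     cust = customer_name.lower()
--     types = [a.get("type") for a in action_log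
--              if a.get("customer", "").lower() == cust]
--     return types.count("email"), types.count("call")
-- ===== Notes on version B (the rewrite author's own statement) =====
-- stated objective: idiomatic
-- what changed: Replaced the explicit loop with two scalar accumulators and an if/elif chain by a single comprehension that collects the types of the customer's actions followed by two post-hoc .count reads, with customer_name.lower() hoisted out of the loop.
import Mathlib
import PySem

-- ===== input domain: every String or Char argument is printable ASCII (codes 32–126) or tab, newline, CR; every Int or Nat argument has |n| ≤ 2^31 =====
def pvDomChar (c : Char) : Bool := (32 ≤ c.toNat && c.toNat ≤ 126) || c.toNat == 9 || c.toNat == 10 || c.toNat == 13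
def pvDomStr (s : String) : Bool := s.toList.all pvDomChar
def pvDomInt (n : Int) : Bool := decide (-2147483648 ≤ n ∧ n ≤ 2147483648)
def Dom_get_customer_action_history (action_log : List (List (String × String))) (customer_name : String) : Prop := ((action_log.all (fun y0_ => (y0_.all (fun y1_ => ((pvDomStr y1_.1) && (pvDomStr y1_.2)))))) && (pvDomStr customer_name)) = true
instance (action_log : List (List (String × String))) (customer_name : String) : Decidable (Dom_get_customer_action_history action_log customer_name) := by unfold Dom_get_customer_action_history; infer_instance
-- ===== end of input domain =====

-- B replaces A's explicit if/elif loop over two scalar accumulators by one comprehension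
-- collecting the matching actions' types plus two .count reads (objective: idiomatic).

-- ===== PORT A =====
def get_customer_action_history (action_log : List (List (String × String))) (customer_name : String) : Int × Int :=
  action_log.foldl (fun (st : Int × Int) a =>
    if PySem.Str.lower ((PySem.Dict.mk a).getD "customer" "") == PySem.Str.lower customer_name then
      if (PySem.Dict.mk a).get? "type" == some "email" then (st.1 + 1, st.2)
      else if (PySem.Dict.mk a).get? "type" == some "call" then (st.1, st.2 + 1)
      else st
    else st) (0, 0)

-- ===== PORT B =====
def get_customer_action_history_alt (action_log : List (List (String × String))) (customer_name : String) : Int × Int :=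
  let cust := PySem.Str.lower customer_name
  let types := (action_log.filter
      (fun a => PySem.Str.lower ((PySem.Dict.mk a).getD "customer" "") == cust)).map
      (fun a => (PySem.Dict.mk a).get? "type")
  (PySem.List.count types (some "email"), PySem.List.count types (some "call"))

-- ===== PRECONDITION & SPEC =====
def Spec_get_customer_action_history (action_log : List (List (String × String))) (customer_name : String) (out : Int × Int) : Prop := out = get_customer_action_history_alt action_log customer_name
instance (action_log : List (List (String × String))) (customer_name : String) (out : Int × Int) : Decidable (Spec_get_customer_action_history action_log customer_name out) := by unfold Spec_get_customer_action_history; infer_instance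

-- ===== CLAIM (what is proved, stated in full; the proofs are below) =====
def Claim_equal_get_customer_action_history : Prop := ∀ (action_log : List (List (String × String))) (customer_name : String), Dom_get_customer_action_history action_log customer_name → Spec_get_customer_action_history action_log customer_name (get_customer_action_history action_log customer_name)

-- ===== LEMMAS AND PROOFS =====

-- A's fold from an arbitrary accumulator adds the two counts B reads off its types list.
theorem pv_fold_counts (customer_name : String) (l : List (List (String × String)))
    (e c : Int) :
    l.foldl (fun (st : Int × Int) a =>
      if PySem.Str.lower ((PySem.Dict.mk a).getD "customer" "") == PySem.Str.lower customer_name then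
        if (PySem.Dict.mk a).get? "type" == some "email" then (st.1 + 1, st.2)
        else if (PySem.Dict.mk a).get? "type" == some "call" then (st.1, st.2 + 1)
        else st
      else st) (e, c) =
    (e + PySem.List.count ((l.filter
        (fun a => PySem.Str.lower ((PySem.Dict.mk a).getD "customer" "") == PySem.Str.lower customer_name)).map
        (fun a => (PySem.Dict.mk a).get? "type")) (some "email"),
     c + PySem.List.count ((l.filter
        (fun a => PySem.Str.lower ((PySem.Dict.mk a).getD "customer" "") == PySem.Str.lower customer_name)).map
        (fun a => (PySem.Dict.mk a).get? "type")) (some "call")) := by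
  induction l generalizing e c with
  | nil => simp [PySem.List.count]
  | cons a l ih =>
    simp only [List.foldl_cons, List.filter_cons]
    by_cases hm : (PySem.Str.lower ((PySem.Dict.mk a).getD "customer" "") == PySem.Str.lower customer_name) = true
    · simp only [hm, if_pos]
      by_cases he : ((PySem.Dict.mk a).get? "type" == some "email") = true
      · rw [if_pos he, ih]
        simp only [List.map_cons, PySem.List.count, List.count_cons, he]
        have : ¬ ((PySem.Dict.mk a).get? "type" == some "call") = true := by
          simp_all
        simp [this]
        ring_nf
      · rw [if_neg he]
        by_cases hc : ((PySem.Dict.mk a).get? "type" == some "call") = true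
        · rw [if_pos hc, ih]
          simp only [List.map_cons, PySem.List.count, List.count_cons, hc, he]
          simp
          ring_nf
        · rw [if_neg hc, ih]
          simp [PySem.List.count, List.count_cons, he, hc]
    · simp only [hm, if_neg, Bool.false_eq_true, not_false_iff]
      rw [ih]
  
-- ===== VERDICT (by name: the statement is the Claim_ definition above) =====
theorem get_customer_action_history_spec : Claim_equal_get_customer_action_history := by
  intro action_log customer_name _
  unfold Spec_get_customer_action_history get_customer_action_history get_customer_action_history_alt
  rw [pv_fold_counts]
  simp
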